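-- pv_equiv track=rewrite | github.com/raeez/chiral-bar-cobar | compute/scripts/_archive/sl3_ce_cohomology.py | wedge_insert
-- ===== SOURCE A (Python) =====
-- def wedge_insert(result_gen, remaining, n_minus_1):
--     """Insert result_gen into the sorted tuple 'remaining'.
--     Returns (sorted_tuple, sign) or None if result_gen is already in remaining."""
--     if result_gen in remaining:
--         return None  # degenerate
--     lst = list(remaining) + [result_gen]
--     # Bubble sort to count transpositions
--     arr = lst[:]
--     swaps = 0
--     for i in range(len(arr)):
--         for j in range(len(arr) - 1 - i):
--             if arr[j] > arr[j+1]: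
--                 arr[j], arr[j+1] = arr[j+1], arr[j]
--                 swaps += 1
--     return tuple(arr), (-1)**swaps
-- ===== SOURCE B (Python) =====
-- def wedge_insert(result_gen, remaining, n_minus_1):
--     """Insert result_gen into the tuple 'remaining'.
--     Returns (sorted_tuple, sign) or None if result_gen is already in remaining."""
--     if result_gen in remaining:
--         return None  # degenerate
--     lst = list(remaining) + [result_gen]
--     # sign = (-1)^(number of inversions); counted directly, sort done by sorted()
--     inv = sum(sum(1 for y in lst[i + 1:] if y < x) for i, x in enumerate(lst))
--     return tuple(sorted(lst)), (-1) ** (inv % 2)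
-- ===== Notes on version B (the rewrite author's own statement) =====
-- stated objective: alternative
-- what changed: Replaced the swap-counting bubble sort by the library sort plus a direct inversion count (sum over pairs i<j with lst[i]>lst[j]); sign = (-1)^(inversions mod 2).
import Mathlib
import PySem

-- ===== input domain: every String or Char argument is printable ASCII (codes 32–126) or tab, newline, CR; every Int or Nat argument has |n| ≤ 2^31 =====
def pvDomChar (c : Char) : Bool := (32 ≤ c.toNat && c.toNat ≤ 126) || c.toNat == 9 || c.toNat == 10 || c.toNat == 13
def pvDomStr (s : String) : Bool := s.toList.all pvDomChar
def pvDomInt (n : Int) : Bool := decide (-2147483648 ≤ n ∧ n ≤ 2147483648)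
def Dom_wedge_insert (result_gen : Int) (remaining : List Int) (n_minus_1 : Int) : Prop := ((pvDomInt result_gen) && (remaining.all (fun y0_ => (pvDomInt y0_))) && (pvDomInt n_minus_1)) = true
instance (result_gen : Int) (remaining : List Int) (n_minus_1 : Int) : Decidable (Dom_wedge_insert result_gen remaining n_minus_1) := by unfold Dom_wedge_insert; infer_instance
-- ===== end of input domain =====

-- B replaces the swap-counting bubble sort by a library sort plus a direct inversion count (alternative algorithm, same results).

-- ===== PORT A =====
-- the body of the inner loop: compare arr[j], arr[j+1], swap and count (indices are in range on every call the port makes)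
def bubStep (st : List Int × Nat) (j : Nat) : List Int × Nat :=
  if st.1.getD j 0 > st.1.getD (j + 1) 0 then
    ((st.1.set j (st.1.getD (j + 1) 0)).set (j + 1) (st.1.getD j 0), st.2 + 1)
  else st

-- len(arr) in A is constant and equal to len(lst) (list.set preserves length), so the port uses lst.length for it
def wedge_insert (result_gen : Int) (remaining : List Int) (n_minus_1 : Int) : Option (List Int × Int) :=
  if remaining.contains result_gen then none
  else
    let lst := remaining ++ [result_gen]
    let res := (List.range lst.length).foldl
      (fun st i => (List.range (lst.length - 1 - i)).foldl bubStep st) (lst, 0)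
    some (res.1, (-1) ^ res.2)

-- ===== PORT B =====
def wedge_insert_alt (result_gen : Int) (remaining : List Int) (n_minus_1 : Int) : Option (List Int × Int) :=
  if remaining.contains result_gen then none
  else
    let lst := remaining ++ [result_gen]
    -- sum(sum(1 for y in lst[i+1:] if y < x) for i, x in enumerate(lst)); the 0/1-sum is countP
    let inv := (PySem.List.enumerate lst 0).foldl
      (fun acc p => acc + (PySem.List.slice lst (some (p.1 + 1)) none).countP (fun y => decide (y < p.2))) 0
    some (PySem.List.sorted lst (fun x => x) false, (-1) ^ (inv % 2))

-- ===== PRECONDITION & SPEC =====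
def Spec_wedge_insert (result_gen : Int) (remaining : List Int) (n_minus_1 : Int) (out : Option (List Int × Int)) : Prop := out = wedge_insert_alt result_gen remaining n_minus_1
instance (result_gen : Int) (remaining : List Int) (n_minus_1 : Int) (out : Option (List Int × Int)) : Decidable (Spec_wedge_insert result_gen remaining n_minus_1 out) := by unfold Spec_wedge_insert; infer_instance

-- ===== CLAIM (what is proved, stated in full; the proofs are below) =====
def Claim_equal_wedge_insert : Prop := ∀ (result_gen : Int) (remaining : List Int) (n_minus_1 : Int), Dom_wedge_insert result_gen remaining n_minus_1 → Spec_wedge_insert result_gen remaining n_minus_1 (wedge_insert result_gen remaining n_minus_1)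

-- ===== LEMMAS AND PROOFS =====

-- structural model of one (bounded) bubble pass, and its swap count
def bpass : Nat → List Int → List Int
  | 0, l => l
  | _ + 1, [] => []
  | _ + 1, [a] => [a]
  | m + 1, a :: b :: t => if b < a then b :: bpass m (a :: t) else a :: bpass m (b :: t)

def bswaps : Nat → List Int → Nat
  | 0, _ => 0
  | _ + 1, [] => 0
  | _ + 1, [_] => 0
  | m + 1, a :: b :: t => if b < a then 1 + bswaps m (a :: t) else bswaps m (b :: t)

def invCount : List Int → Nat
  | [] => 0
  | a :: t => t.countP (fun y => decide (y < a)) + invCount t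

lemma foldl_bubStep_map_succ (ns : List Nat) : ∀ (c : Int) (t : List Int) (s : Nat),
    (ns.map Nat.succ).foldl bubStep (c :: t, s)
      = (c :: (ns.foldl bubStep (t, s)).1, (ns.foldl bubStep (t, s)).2) := by
  induction ns with
  | nil => intro c t s; simp
  | cons k ns ih =>
    intro c t s
    have hstep : bubStep (c :: t, s) (Nat.succ k)
        = (c :: (bubStep (t, s) k).1, (bubStep (t, s) k).2) := by
      simp only [bubStep]
      split_ifs with h1 h2 h2 <;> simp_all <;> omega
    simp only [List.map_cons, List.foldl_cons, hstep, ih]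

lemma foldl_range_bubStep : ∀ (m : Nat) (arr : List Int) (s : Nat), m < arr.length →
    (List.range m).foldl bubStep (arr, s) = (bpass m arr, s + bswaps m arr) := by
  intro m
  induction m with
  | zero => intro arr s _; simp [bpass, bswaps]
  | succ m ih =>
    intro arr s h
    match arr with
    | [] => simp at h
    | [a] => simp at h
    | a :: b :: t =>
      rw [List.range_succ_eq_map, List.foldl_cons]
      have hstep : bubStep (a :: b :: t, s) 0
          = if b < a then (b :: a :: t, s + 1) else (a :: b :: t, s) := by
        simp only [bubStep]
        split_ifs with h1 h2 h2 <;> simp_all <;> omega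
      rw [hstep]
      by_cases hba : b < a
      · rw [if_pos hba, foldl_bubStep_map_succ,
          ih (a :: t) (s + 1) (by simp at h ⊢; omega)]
        simp [bpass, bswaps, hba]; omega
      · rw [if_neg hba, foldl_bubStep_map_succ,
          ih (b :: t) s (by simp at h ⊢; omega)]
        simp [bpass, bswaps, hba]

lemma bpass_perm : ∀ (m : Nat) (l : List Int), (bpass m l).Perm l := by
  intro m
  induction m with
  | zero => intro l; simp [bpass]
  | succ m ih =>
    intro l
    match l with
    | [] => simp [bpass]
    | [a] => simp [bpass]
    | a :: b :: t =>
      simp only [bpass]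
      split_ifs with h
      · exact ((ih (a :: t)).cons b).trans (List.Perm.swap a b t)
      · exact (ih (b :: t)).cons a

lemma bpass_decomp : ∀ (m : Nat) (arr : List Int), m < arr.length →
    ∃ v M, bpass m arr = v ++ M :: arr.drop (m + 1) ∧ (∀ x ∈ v, x ≤ M) ∧
      (v ++ [M]).Perm (arr.take (m + 1)) := by
  intro m
  induction m with
  | zero =>
    intro arr h
    match arr with
    | [] => simp at h
    | a :: t => exact ⟨[], a, by simp [bpass], by simp, by simp⟩
  | succ m ih =>
    intro arr h
    match arr with
    | [] => simp at h
    | [a] => simp at h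
    | a :: b :: t =>
      have hlen : m < (a :: t).length := by simp at h ⊢; omega
      have hlen' : m < (b :: t).length := by simp at h ⊢; omega
      simp only [bpass]
      split_ifs with hba
      · obtain ⟨v, M, he, hv, hp⟩ := ih (a :: t) hlen
        have haM : a ≤ M := by
          have : a ∈ v ++ [M] := hp.mem_iff.mpr (by simp)
          rcases List.mem_append.1 this with hx | hx
          · exact hv a hx
          · simp at hx; omega
        refine ⟨b :: v, M, ?_, ?_, ?_⟩
        · simp [he, List.drop]
        · intro x hx
          rcases List.mem_cons.1 hx with rfl | hx
          · omega
          · exact hv x hx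
        · have : (b :: (v ++ [M])).Perm (b :: a :: (a :: t).tail.take m) := by
            refine List.Perm.cons b ?_
            simpa [List.take_cons] using hp
          simp only [List.cons_append]
          refine this.trans ?_
          simp only [List.tail_cons]
          exact List.Perm.swap a b (t.take m)
      · obtain ⟨v, M, he, hv, hp⟩ := ih (b :: t) hlen'
        have hbM : b ≤ M := by
          have : b ∈ v ++ [M] := hp.mem_iff.mpr (by simp)
          rcases List.mem_append.1 this with hx | hx
          · exact hv b hx
          · simp at hx; omega
        refine ⟨a :: v, M, ?_, ?_, ?_⟩
        · simp [he, List.drop]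
        · intro x hx
          rcases List.mem_cons.1 hx with rfl | hx
          · omega
          · exact hv x hx
        · have : (a :: (v ++ [M])).Perm (a :: b :: t.take m) := by
            refine List.Perm.cons a ?_
            simpa [List.take_cons] using hp
          simpa [List.take_cons] using this

lemma bpass_inv : ∀ (m : Nat) (l : List Int),
    invCount (bpass m l) + bswaps m l = invCount l := by
  intro m
  induction m with
  | zero => intro l; simp [bpass, bswaps]
  | succ m ih =>
    intro l
    match l with
    | [] => simp [bpass, bswaps, invCount]
    | [a] => simp [bpass, bswaps, invCount]
    | a :: b :: t =>
      simp only [bpass, bswaps]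
      split_ifs with hba
      · have hcnt := (bpass_perm m (a :: t)).countP_eq (fun y => decide (y < b))
        have hih := ih (a :: t)
        simp only [invCount, List.countP_cons, hcnt] at *
        have hab : ¬ (a < b) := by omega
        simp [hba, hab] at *
        omega
      · have hcnt := (bpass_perm m (b :: t)).countP_eq (fun y => decide (y < a))
        have hih := ih (b :: t)
        simp only [invCount, List.countP_cons, hcnt] at *
        have hba' : ¬ (b < a) := hba
        simp [hba'] at *
        omega

lemma invCount_eq_zero_of_pairwise : ∀ (l : List Int), l.Pairwise (· ≤ ·) → invCount l = 0 := by
  intro l hl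
  induction l with
  | nil => simp [invCount]
  | cons a t ih =>
    rcases List.pairwise_cons.1 hl with ⟨ha, ht⟩
    have : t.countP (fun y => decide (y < a)) = 0 := by
      rw [List.countP_eq_zero]
      intro y hy
      simpa using by have := ha y hy; omega
    simp [invCount, this, ih ht]

lemma outer_loop (n : Nat) : ∀ (c i : Nat) (arr : List Int) (s : Nat),
    arr.length = n → i + c = n →
    (arr.drop (n - i)).Pairwise (· ≤ ·) →
    (∀ x ∈ arr.take (n - i), ∀ y ∈ arr.drop (n - i), x ≤ y) →
    ∃ arr' s',
      (List.range' i c).foldl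
        (fun st k => (List.range (n - 1 - k)).foldl bubStep st) (arr, s) = (arr', s')
      ∧ arr'.Perm arr ∧ arr'.Pairwise (· ≤ ·) ∧ s' + invCount arr' = s + invCount arr := by
  intro c
  induction c with
  | zero =>
    intro i arr s hlen hic hsort _
    refine ⟨arr, s, by simp, List.Perm.refl arr, ?_, rfl⟩
    have : n - i = 0 := by omega
    simpa [this] using hsort
  | succ c ih =>
    intro i arr s hlen hic hsort hdom
    have hin : i < n := by omega
    have hm : n - 1 - i < arr.length := by omega
    rw [List.range'_succ, List.foldl_cons, foldl_range_bubStep (n - 1 - i) arr s hm]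
    obtain ⟨v, M, he, hv, hp⟩ := bpass_decomp (n - 1 - i) arr hm
    have hm1 : n - 1 - i + 1 = n - i := by omega
    rw [hm1] at he hp
    have hvlen : v.length + 1 = n - i := by
      have := hp.length_eq
      simp [hlen] at this
      omega
    have hMmem : M ∈ arr.take (n - i) := hp.mem_iff.mp (by simp)
    have hvsub : ∀ x ∈ v, x ∈ arr.take (n - i) := fun x hx =>
      hp.mem_iff.mp (by simp [hx])
    set arr1 := v ++ M :: arr.drop (n - i) with harr1
    have hperm1 : arr1.Perm arr := he ▸ bpass_perm (n - 1 - i) arr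
    have hlen1 : arr1.length = n := by rw [hperm1.length_eq, hlen]
    have hdrop1 : arr1.drop (n - (i + 1)) = M :: arr.drop (n - i) := by
      have : n - (i + 1) = v.length := by omega
      rw [this, harr1, List.drop_left]
    have htake1 : arr1.take (n - (i + 1)) = v := by
      have : n - (i + 1) = v.length := by omega
      rw [this, harr1, List.take_left]
    have hsort1 : (arr1.drop (n - (i + 1))).Pairwise (· ≤ ·) := by
      rw [hdrop1]
      refine List.pairwise_cons.2 ⟨fun y hy => hdom M hMmem y hy, hsort⟩
    have hdom1 : ∀ x ∈ arr1.take (n - (i + 1)), ∀ y ∈ arr1.drop (n - (i + 1)), x ≤ y := by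
      rw [htake1, hdrop1]
      intro x hx y hy
      rcases List.mem_cons.1 hy with rfl | hy
      · exact hv x hx
      · exact hdom x (hvsub x hx) y hy
    obtain ⟨arr', s', hfold, hperm', hsort', hs'⟩ :=
      ih (i + 1) arr1 (s + bswaps (n - 1 - i) arr) hlen1 (by omega) hsort1 hdom1
    refine ⟨arr', s', by rw [← he] at hfold; exact hfold, (hperm'.trans hperm1), hsort', ?_⟩
    have hinv1 : invCount arr1 + bswaps (n - 1 - i) arr = invCount arr :=
      he ▸ bpass_inv (n - 1 - i) arr
    omega

lemma neg_one_pow_mod_two (s : Nat) : ((-1 : Int)) ^ s = (-1 : Int) ^ (s % 2) := by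
  conv_lhs => rw [← Nat.div_add_mod s 2]
  rw [pow_add, pow_mul]
  norm_num

lemma enum_fold (lst : List Int) : ∀ (t pre : List Int) (acc : Nat), lst = pre ++ t →
    (PySem.List.enumerate t (pre.length : Int)).foldl
      (fun acc p => acc + (PySem.List.slice lst (some (p.1 + 1)) none).countP
        (fun y => decide (y < p.2))) acc
    = acc + invCount t := by
  intro t
  induction t with
  | nil => intro pre acc _; simp [PySem.List.enumerate_nil, invCount]
  | cons a t ih =>
    intro pre acc hl
    rw [PySem.List.enumerate_cons, List.foldl_cons]
    have hsl : PySem.List.slice lst (some ((pre.length : Int) + 1)) none = t := by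
      have : ((pre.length : Int) + 1) = ((pre.length + 1 : Nat) : Int) := by push_cast; ring
      rw [this, PySem.List.slice_from_natCast, hl]
      rw [show pre.length + 1 = (pre ++ [a]).length by simp]
      rw [show pre ++ a :: t = (pre ++ [a]) ++ t by simp]
      exact List.drop_left
    have hnext : (pre.length : Int) + 1 = (((pre ++ [a]).length : Nat) : Int) := by
      simp only [List.length_append, List.length_cons, List.length_nil]; push_cast; ring
    rw [hsl, hnext, ih (pre ++ [a]) _ (by simp [hl])]
    simp [invCount]; omega

lemma enum_fold_zero (lst : List Int) :
    (PySem.List.enumerate lst 0).foldl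
      (fun acc p => acc + (PySem.List.slice lst (some (p.1 + 1)) none).countP
        (fun y => decide (y < p.2))) 0
    = invCount lst := by
  have := enum_fold lst lst [] 0 (by simp)
  simpa using this

-- ===== VERDICT (by name: the statement is the Claim_ definition above) =====
theorem wedge_insert_spec : Claim_equal_wedge_insert := by
  intro rg rem n1 _
  unfold Spec_wedge_insert wedge_insert wedge_insert_alt
  by_cases hc : rem.contains rg
  · simp only [hc, if_true]
  · simp only [hc, Bool.false_eq_true, if_false]
    set lst := rem ++ [rg] with hlst
    obtain ⟨arr', s', hfold, hperm, hsort, hs⟩ :=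
      outer_loop lst.length lst.length 0 lst 0 rfl (by omega)
        (by simp) (by simp)
    rw [← List.range_eq_range'] at hfold
    rw [hfold, enum_fold_zero]
    have hz : invCount arr' = 0 := invCount_eq_zero_of_pairwise arr' hsort
    have hs' : s' = invCount lst := by omega
    have hsorted : PySem.List.sorted lst (fun x => x) false = arr' :=
      PySem.List.sorted_id_eq_of_perm_of_pairwise lst arr' hperm hsort
    rw [hsorted, hs', neg_one_pow_mod_two]
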